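-- pv_equiv track=rewrite | github.com/GoliathBritton/goliath-quantum-starter | src/nqba_stack/qtransformer.py | _output_projection
-- ===== SOURCE A (Python) =====
-- from typing import List, Dict, Any, Optional
--
-- def _output_projection(tokens: List[str]) -> List[str]:
--     """
--     Final output projection to clean up and format the token sequence.
--
--     Removes excessive markers and ensures consistent formatting.
--     """
--     projected = []
--
--     for token in tokens:
--         # Clean up excessive markers
--         cleaned = token
--
--         # Remove redundant markers
--         while "++" in cleaned:
--             cleaned = cleaned.replace("++", "+")
--         while "--" in cleaned:
--             cleaned = cleaned.replace("--", "-")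
--         while "**" in cleaned:
--             cleaned = cleaned.replace("**", "*")
--
--         # Limit marker complexity
--         if cleaned.count("|") > 1:
--             parts = cleaned.split("|")
--             cleaned = f"{parts[0]}|{parts[-1]}"  # Keep first and last part
--
--         # Ensure reasonable token length
--         if len(cleaned) > len(token) * 2:
--             # If token became too complex, simplify
--             base_token = token
--             for marker in ["#", "^", "*", "<", ">", "+", "-", "|"]:
--                 base_token = base_token.replace(marker, "")
--             cleaned = base_token
--
--         projected.append(cleaned)
--
--     return projected
-- ===== SOURCE B (Python) =====
-- def _output_projection(tokens):
--     """Single left-to-right pass collapses runs of '+', '-', '*' (instead of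
--     repeated replace-until-fixpoint rescans); '|' trimming and length guard unchanged."""
--     projected = []
--     for token in tokens:
--         out = []
--         for ch in token:
--             if ch in "+-*" and out and out[-1] == ch:
--                 continue
--             out.append(ch)
--         cleaned = "".join(out)
--
--         if cleaned.count("|") > 1:
--             parts = cleaned.split("|")
--             cleaned = f"{parts[0]}|{parts[-1]}"
--
--         if len(cleaned) > len(token) * 2:
--             base_token = token
--             for marker in ["#", "^", "*", "<", ">", "+", "-", "|"]:
--                 base_token = base_token.replace(marker, "")
--             cleaned = base_token
--
--         projected.append(cleaned)
--     return projected
-- ===== Notes on version B (the rewrite author's own statement) =====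
-- stated objective: simpler
-- what changed: The three repeated replace-until-fixpoint while loops are replaced by one left-to-right pass that collapses consecutive duplicate '+'/'-'/'*' markers; the '|' trimming and length guard are unchanged.
import Mathlib
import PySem

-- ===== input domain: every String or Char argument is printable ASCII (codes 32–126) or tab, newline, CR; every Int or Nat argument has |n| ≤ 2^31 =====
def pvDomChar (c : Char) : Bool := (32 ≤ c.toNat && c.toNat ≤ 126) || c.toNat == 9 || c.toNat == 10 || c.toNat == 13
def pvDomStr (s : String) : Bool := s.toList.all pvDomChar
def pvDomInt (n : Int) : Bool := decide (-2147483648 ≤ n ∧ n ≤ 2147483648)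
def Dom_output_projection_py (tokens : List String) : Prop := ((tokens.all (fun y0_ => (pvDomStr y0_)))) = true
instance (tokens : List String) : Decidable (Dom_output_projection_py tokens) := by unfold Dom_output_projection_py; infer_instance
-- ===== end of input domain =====

-- B replaces A's three replace-until-fixpoint while loops by one left-to-right pass that
-- collapses consecutive duplicate '+'/'-'/'*' markers; the '|' trimming and length guard are unchanged.

-- ===== PORT A =====
-- Structural versions of ".replace(cc, c)" / "cc in s" used only to justify termination of the
-- while loop below (the port itself calls the PySem primitives).
def pvRepl (c : Char) : List Char → List Char
  | a :: b :: t => if a = c ∧ b = c then c :: pvRepl c t else a :: pvRepl c (b :: t)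
  | l => l

def pvContains2 (c : Char) : List Char → Bool
  | a :: b :: t => (a = c && b = c) || pvContains2 c (b :: t)
  | _ => false

theorem pvReplaceGo_cc (c : Char) :
    ∀ (fuel : Nat) (l acc : List Char), l.length ≤ fuel →
      PySem.Chars.replace.go [c, c] [c] fuel l acc = acc.reverse ++ pvRepl c l := by
  intro fuel
  induction fuel with
  | zero =>
    intro l acc h
    have hl : l = [] := List.eq_nil_of_length_eq_zero (Nat.le_zero.mp h)
    subst hl
    rw [PySem.Chars.replace.go]
    simp [pvRepl]
  | succ fuel ih =>
    intro l acc h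
    match l with
    | [] =>
      rw [PySem.Chars.replace.go]
      simp [pvRepl]
      omega
    | a :: t =>
      rw [PySem.Chars.replace.go]
      by_cases hp : [c, c].isPrefixOf (a :: t) = true
      · rw [if_pos hp]
        have := List.isPrefixOf_iff_prefix.mp hp
        match t, this with
        | c' :: t', h2 =>
          have hac : a = c ∧ c' = c := by
            rcases List.cons_prefix_cons.mp h2 with ⟨h3, h4⟩
            rcases List.cons_prefix_cons.mp h4 with ⟨h5, _⟩
            exact ⟨h3.symm, h5.symm⟩
          obtain ⟨ha, hc'⟩ := hac
          have hlen : t'.length ≤ fuel := by simp at h; omega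
          rw [show List.drop ([c, c] : List Char).length (a :: c' :: t') = t' from rfl]
          rw [ih t' ([c].reverse ++ acc) hlen]
          rw [pvRepl, if_pos ⟨ha, hc'⟩]
          simp
      · rw [if_neg hp]
        have hlen : t.length ≤ fuel := by simp at h; omega
        rw [ih t (a :: acc) hlen]
        match t with
        | [] => simp [pvRepl]
        | b :: t' =>
          have : ¬ (a = c ∧ b = c) := by
            intro ⟨h1, h2⟩; subst h1; subst h2
            exact hp (List.isPrefixOf_iff_prefix.mpr (by simp [List.cons_prefix_cons]))
          simp [pvRepl, if_neg this]

theorem pvReplace_cc_eq (c : Char) (l : List Char) :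
    PySem.Chars.replace l [c, c] [c] = pvRepl c l := by
  rw [PySem.Chars.replace]
  simp only [List.isEmpty_cons]
  exact pvReplaceGo_cc c l.length l [] le_rfl

theorem pvContains2_iff (c : Char) : ∀ l : List Char, pvContains2 c l = true ↔ [c, c] <:+: l
  | [] => by simp [pvContains2]
  | [a] => by
    simp only [pvContains2, Bool.false_eq_true, false_iff]
    intro h
    have := h.length_le
    simp at this
  | a :: b :: t => by
    rw [pvContains2]
    rw [List.infix_cons_iff]
    constructor
    · intro h
      simp only [Bool.or_eq_true, Bool.and_eq_true, decide_eq_true_eq] at h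
      rcases h with ⟨h1, h2⟩ | h
      · left
        rw [List.cons_prefix_cons, List.cons_prefix_cons]
        exact ⟨h1.symm, h2.symm, by simp⟩
      · right; exact (pvContains2_iff c (b :: t)).mp h
    · intro h
      rcases h with h | h
      · rcases List.cons_prefix_cons.mp h with ⟨h1, h2⟩
        rcases List.cons_prefix_cons.mp h2 with ⟨h3, _⟩
        subst h1; subst h3
        simp
      · simp only [Bool.or_eq_true]
        exact Or.inr ((pvContains2_iff c (b :: t)).mpr h)

theorem pvIsIn_cc_eq (c : Char) (l : List Char) :
    PySem.Chars.isIn [c, c] l = pvContains2 c l := by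
  by_cases h : pvContains2 c l = true
  · rw [h]
    exact (PySem.Chars.isIn_iff_infix _ _).mpr ((pvContains2_iff c l).mp h)
  · rw [Bool.not_eq_true] at h
    rw [h]
    exact (PySem.Chars.isIn_eq_false_iff _ _).mpr (fun hin => by
      rw [(pvContains2_iff c l).mpr hin] at h; simp at h)

theorem pvRepl_length_le (c : Char) : ∀ l : List Char, (pvRepl c l).length ≤ l.length
  | [] => le_rfl
  | [a] => le_rfl
  | a :: b :: t => by
    rw [pvRepl]
    split_ifs with h
    · have := pvRepl_length_le c t; simp; omega
    · have := pvRepl_length_le c (b :: t); simp at this ⊢; omega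

theorem pvRepl_length_lt (c : Char) : ∀ l : List Char, pvContains2 c l = true →
    (pvRepl c l).length < l.length
  | [], h => by simp [pvContains2] at h
  | [a], h => by simp [pvContains2] at h
  | a :: b :: t, h => by
    rw [pvRepl]
    split_ifs with hab
    · have := pvRepl_length_le c t; simp; omega
    · rw [pvContains2] at h
      simp only [Bool.or_eq_true, Bool.and_eq_true, decide_eq_true_eq] at h
      rcases h with ⟨h1, h2⟩ | h1
      · exact absurd ⟨h1, h2⟩ hab
      · have := pvRepl_length_lt c (b :: t) h1; simp at this ⊢; omega

-- 'while "cc" in cleaned: cleaned = cleaned.replace("cc", "c")'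
def pvWhileRepl (c : Char) (l : List Char) : List Char :=
  if PySem.Chars.isIn [c, c] l = true then pvWhileRepl c (PySem.Chars.replace l [c, c] [c]) else l
termination_by l.length
decreasing_by
  rename_i h
  rw [pvReplace_cc_eq]
  exact pvRepl_length_lt c l (by rw [← pvIsIn_cc_eq]; exact h)


-- The '|' trimming and the length guard: this code is IDENTICAL in Source A and in Source B, so the
-- two ports share this helper.  parts[0]/parts[-1] via headD/getLastD is exact: split returns ≥ 1 part.
def pvPipeGuard (token cleaned : List Char) : List Char :=
  let cleaned2 := if 1 < PySem.Chars.count cleaned ['|'] then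
      (PySem.Chars.splitOn cleaned ['|']).headD [] ++ ['|'] ++ (PySem.Chars.splitOn cleaned ['|']).getLastD []
    else cleaned
  if token.length * 2 < cleaned2.length then
    List.foldl (fun b m => PySem.Chars.replace b [m] []) token ['#', '^', '*', '<', '>', '+', '-', '|']
  else cleaned2

def output_projection_py (tokens : List String) : List String :=
  tokens.foldl (fun projected token =>
    let c1 := pvWhileRepl '+' token.toList
    let c2 := pvWhileRepl '-' c1
    let c3 := pvWhileRepl '*' c2
    projected ++ [String.ofList (pvPipeGuard token.toList c3)]) []

-- ===== PORT B =====
-- single pass: append each char unless it is one of '+','-','*' and equals the previous kept char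
def pvCollapsePass : Option Char → List Char → List Char
  | prev, ch :: t =>
    if (ch = '+' ∨ ch = '-' ∨ ch = '*') ∧ prev = some ch then pvCollapsePass prev t
    else ch :: pvCollapsePass (some ch) t
  | _, [] => []

def output_projection_py_alt (tokens : List String) : List String :=
  tokens.foldl (fun projected token =>
    let cleaned := pvCollapsePass none token.toList
    projected ++ [String.ofList (pvPipeGuard token.toList cleaned)]) []

-- ===== PRECONDITION & SPEC =====
def Spec_output_projection_py (tokens : List String) (out : List String) : Prop := out = output_projection_py_alt tokens
instance (tokens : List String) (out : List String) : Decidable (Spec_output_projection_py tokens out) := by unfold Spec_output_projection_py; infer_instance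

-- ===== CLAIM (what is proved, stated in full; the proofs are below) =====
def Claim_equal_output_projection_py : Prop := ∀ (tokens : List String), Dom_output_projection_py tokens → Spec_output_projection_py tokens (output_projection_py tokens)

-- ===== LEMMAS AND PROOFS =====
-- run-collapse of a single character c: the common value of A's while loop and one stage of B's pass
def pvCollapse (c : Char) : List Char → List Char
  | a :: b :: t => if a = c ∧ b = c then pvCollapse c (b :: t) else a :: pvCollapse c (b :: t)
  | l => l

theorem pvRepl_cons (c : Char) : ∀ (b : Char) (t : List Char), ∃ r, pvRepl c (b :: t) = b :: r
  | b, [] => ⟨[], rfl⟩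
  | b, x :: t => by
    rw [pvRepl]
    split_ifs with h
    · exact ⟨pvRepl c t, by rw [h.1]⟩
    · exact ⟨pvRepl c (x :: t), rfl⟩

theorem pvCollapse_cons (c : Char) : ∀ (b : Char) (t : List Char), ∃ r, pvCollapse c (b :: t) = b :: r
  | b, [] => ⟨[], rfl⟩
  | b, x :: t => by
    rw [pvCollapse]
    split_ifs with h
    · obtain ⟨r, hr⟩ := pvCollapse_cons c x t
      exact ⟨r, by rw [hr, h.1, h.2]⟩
    · exact ⟨pvCollapse c (x :: t), rfl⟩

theorem pvCollapse_repl (c : Char) : ∀ l : List Char, pvCollapse c (pvRepl c l) = pvCollapse c l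
  | [] => rfl
  | [a] => rfl
  | a :: b :: t => by
    rw [pvRepl]
    split_ifs with hab
    · obtain ⟨ha, hb⟩ := hab
      rw [ha, hb]
      rw [show pvCollapse c (c :: c :: t) = pvCollapse c (c :: t) by rw [pvCollapse, if_pos ⟨rfl, rfl⟩]]
      match t with
      | [] => rfl
      | x :: t' =>
        obtain ⟨r, hr⟩ := pvRepl_cons c x t'
        rw [hr]
        by_cases hx : x = c
        · rw [show pvCollapse c (c :: x :: r) = pvCollapse c (x :: r) by rw [pvCollapse, if_pos ⟨rfl, hx⟩]]
          rw [show pvCollapse c (c :: x :: t') = pvCollapse c (x :: t') by rw [pvCollapse, if_pos ⟨rfl, hx⟩]]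
          rw [← hr]
          exact pvCollapse_repl c (x :: t')
        · rw [show pvCollapse c (c :: x :: r) = c :: pvCollapse c (x :: r) by
            rw [pvCollapse, if_neg (fun h => hx h.2)]]
          rw [show pvCollapse c (c :: x :: t') = c :: pvCollapse c (x :: t') by
            rw [pvCollapse, if_neg (fun h => hx h.2)]]
          rw [← hr]
          rw [pvCollapse_repl c (x :: t')]
    · obtain ⟨r, hr⟩ := pvRepl_cons c b t
      rw [hr]
      rw [show pvCollapse c (a :: b :: r) = a :: pvCollapse c (b :: r) by rw [pvCollapse, if_neg hab]]
      rw [show pvCollapse c (a :: b :: t) = a :: pvCollapse c (b :: t) by rw [pvCollapse, if_neg hab]]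
      rw [← hr]
      rw [pvCollapse_repl c (b :: t)]

theorem pvCollapse_of_no2 (c : Char) : ∀ l : List Char, pvContains2 c l = false →
    pvCollapse c l = l
  | [], _ => rfl
  | [a], _ => rfl
  | a :: b :: t, h => by
    rw [pvContains2] at h
    rcases Bool.or_eq_false_iff.mp h with ⟨h1, h2⟩
    rw [pvCollapse, if_neg (by
      intro ⟨ha, hb⟩
      subst ha; subst hb
      simp at h1)]
    rw [pvCollapse_of_no2 c (b :: t) h2]

theorem pvWhileRepl_eq_collapse (c : Char) (l : List Char) :
    pvWhileRepl c l = pvCollapse c l := by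
  rw [pvWhileRepl]
  split_ifs with h
  · have hlt : (pvRepl c l).length < l.length :=
      pvRepl_length_lt c l (by rw [← pvIsIn_cc_eq]; exact h)
    rw [pvReplace_cc_eq]
    rw [pvWhileRepl_eq_collapse c (pvRepl c l)]
    exact pvCollapse_repl c l
  · rw [Bool.not_eq_true] at h
    rw [pvIsIn_cc_eq] at h
    exact (pvCollapse_of_no2 c l h).symm
termination_by l.length
decreasing_by exact hlt

theorem pvPass_none_cons (a : Char) (t : List Char) :
    pvCollapsePass none (a :: t) = a :: pvCollapsePass (some a) t := by
  rw [pvCollapsePass, if_neg (by simp)]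

theorem pvCollapse3_eq_pass : ∀ l : List Char,
    pvCollapse '*' (pvCollapse '-' (pvCollapse '+' l)) = pvCollapsePass none l
  | [] => rfl
  | [a] => by simp [pvCollapse, pvCollapsePass]
  | a :: b :: t => by
    by_cases hab : a = b ∧ (b = '+' ∨ b = '-' ∨ b = '*')
    · obtain ⟨hab1, hmk⟩ := hab
      subst hab1
      have hpass : pvCollapsePass none (a :: a :: t) = pvCollapsePass none (a :: t) := by
        rw [pvPass_none_cons, pvPass_none_cons,
          show pvCollapsePass (some a) (a :: t) = pvCollapsePass (some a) t from by
            rw [pvCollapsePass, if_pos ⟨hmk, rfl⟩]]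
      rcases hmk with h | h | h <;> subst h
      · rw [show pvCollapse '+' ('+'::'+'::t) = pvCollapse '+' ('+'::t) from by
            rw [pvCollapse, if_pos ⟨rfl, rfl⟩]]
        rw [pvCollapse3_eq_pass ('+'::t), hpass]
      · obtain ⟨r, hr⟩ := pvCollapse_cons '+' '-' t
        rw [show pvCollapse '+' ('-'::'-'::t) = '-' :: pvCollapse '+' ('-'::t) from by
            rw [pvCollapse, if_neg (by decide)]]
        rw [hr]
        rw [show pvCollapse '-' ('-'::'-'::r) = pvCollapse '-' ('-'::r) from by
            rw [pvCollapse, if_pos ⟨rfl, rfl⟩]]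
        rw [← hr]
        rw [pvCollapse3_eq_pass ('-'::t), hpass]
      · obtain ⟨r1, hr1⟩ := pvCollapse_cons '+' '*' t
        rw [show pvCollapse '+' ('*'::'*'::t) = '*' :: pvCollapse '+' ('*'::t) from by
            rw [pvCollapse, if_neg (by decide)]]
        rw [hr1]
        obtain ⟨r2, hr2⟩ := pvCollapse_cons '-' '*' r1
        rw [show pvCollapse '-' ('*'::'*'::r1) = '*' :: pvCollapse '-' ('*'::r1) from by
            rw [pvCollapse, if_neg (by decide)]]
        rw [hr2]
        rw [show pvCollapse '*' ('*'::'*'::r2) = pvCollapse '*' ('*'::r2) from by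
            rw [pvCollapse, if_pos ⟨rfl, rfl⟩]]
        rw [← hr2, ← hr1, pvCollapse3_eq_pass ('*'::t), hpass]
    · have hc : ∀ c : Char, (c = '+' ∨ c = '-' ∨ c = '*') → ¬ (a = c ∧ b = c) := by
        intro c hcm hh
        exact hab ⟨hh.1.trans hh.2.symm, hh.2 ▸ hcm⟩
      have hpass : pvCollapsePass none (a :: b :: t) = a :: pvCollapsePass none (b :: t) := by
        rw [pvPass_none_cons]
        rw [show pvCollapsePass (some a) (b :: t) = b :: pvCollapsePass (some b) t from by
          rw [pvCollapsePass, if_neg (fun hh => hab ⟨Option.some.inj hh.2, hh.1⟩)]]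
        rw [pvPass_none_cons]
      obtain ⟨r1, hr1⟩ := pvCollapse_cons '+' b t
      rw [show pvCollapse '+' (a::b::t) = a :: pvCollapse '+' (b::t) from by
          rw [pvCollapse, if_neg (hc '+' (by decide))]]
      rw [hr1]
      obtain ⟨r2, hr2⟩ := pvCollapse_cons '-' b r1
      rw [show pvCollapse '-' (a::b::r1) = a :: pvCollapse '-' (b::r1) from by
          rw [pvCollapse, if_neg (hc '-' (by decide))]]
      rw [hr2]
      rw [show pvCollapse '*' (a::b::r2) = a :: pvCollapse '*' (b::r2) from by
          rw [pvCollapse, if_neg (hc '*' (by decide))]]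
      rw [← hr2, ← hr1, pvCollapse3_eq_pass (b::t), hpass]

-- ===== VERDICT (by name: the statement is the Claim_ definition above) =====
theorem output_projection_py_spec : Claim_equal_output_projection_py := by
  intro tokens _
  unfold Spec_output_projection_py output_projection_py output_projection_py_alt
  congr 1
  funext projected token
  simp only [pvWhileRepl_eq_collapse, pvCollapse3_eq_pass]
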